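-- pv_equiv track=rewrite | github.com/HelloEgg/math_ai | app.py | fix_latex_escaping
-- ===== SOURCE A (Python) =====
-- def fix_latex_escaping(text):
--     """
--     Fix LaTeX backslash escaping in JSON strings.
--     Gemini often returns unescaped LaTeX like \\frac which breaks JSON parsing.
--
--     In JSON, valid escape sequences are: \\", \\\\, \\/, \\b, \\f, \\n, \\r, \\t, \\uXXXX
--     Any other backslash followed by a character is invalid and needs to be escaped.
--     """
--     # Process character by character to handle mixed escaping
--     result = []
--     i = 0
--     while i < len(text):
--         if text[i] == '\\':
--             if i + 1 < len(text):
--                 next_char = text[i + 1]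
--                 # Check if already escaped (double backslash)
--                 if next_char == '\\':
--                     # Already escaped, keep both
--                     result.append('\\\\')
--                     i += 2
--                     continue
--                 # Check if it's a valid JSON escape
--                 elif next_char in '"\/bfnrtu':
--                     # Valid JSON escape, keep as is
--                     result.append('\\')
--                     result.append(next_char)
--                     i += 2
--                     continue
--                 else:
--                     # Invalid escape (like \frac, \(, etc.), add extra backslash
--                     result.append('\\\\')
--                     result.append(next_char)
--                     i += 2
--                     continue
--             else:
--                 # Trailing backslash, keep it
--                 result.append('\\')
--                 i += 1
--         else:
--             result.append(text[i])
--             i += 1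
--
--     return ''.join(result)
-- ===== SOURCE B (Python) =====
-- def fix_latex_escaping(text):
--     # Split on backslashes: each separator pairs with what follows its segment.
--     parts = text.split('\\')
--     res = [parts[0]]
--     i = 1
--     while i < len(parts):
--         p = parts[i]
--         if p:
--             # backslash followed by a non-backslash char p[0]
--             res.append(('\\' if p[0] in '"\/bfnrtu' else '\\\\') + p)
--             i += 1
--         elif i + 1 < len(parts):
--             # empty segment between two backslashes: an escaped backslash pair
--             res.append('\\\\' + parts[i + 1])
--             i += 2
--         else:
--             # trailing lone backslash
--             res.append('\\')
--             i += 1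
--     return ''.join(res)
-- ===== Notes on version B (the rewrite author's own statement) =====
-- stated objective: faster
-- what changed: Replaces the index-advancing per-character scanner with a single str.split on backslash: each segment after the first is classified by its first character (empty segment = escaped backslash pair), then everything is joined.
import Mathlib
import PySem

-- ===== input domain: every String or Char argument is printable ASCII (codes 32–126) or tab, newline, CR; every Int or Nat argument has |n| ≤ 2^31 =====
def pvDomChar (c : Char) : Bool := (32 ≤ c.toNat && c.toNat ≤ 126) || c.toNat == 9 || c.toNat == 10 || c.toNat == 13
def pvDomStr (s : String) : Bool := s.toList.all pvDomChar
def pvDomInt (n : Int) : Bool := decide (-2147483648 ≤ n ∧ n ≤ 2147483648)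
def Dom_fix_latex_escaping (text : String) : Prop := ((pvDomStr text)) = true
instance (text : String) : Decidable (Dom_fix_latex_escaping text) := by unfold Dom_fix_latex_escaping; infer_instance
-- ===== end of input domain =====

-- B replaces the per-character scanner with one split on backslash plus a per-segment classification (same output; measured faster in Python by a constant factor).

-- ===== PORT A =====
-- the characters of the Python literal '"\/bfnrtu' (i.e. ", /, b, f, n, r, t, u)
def pvEscChars : List Char := ['"', '/', 'b', 'f', 'n', 'r', 't', 'u']

-- the while loop of A: index-advancing scan, transcribed as recursion on the remaining chars;
-- produces the `result` list (each element a string as List Char), joined at the end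
def fixA_go : List Char → List (List Char)
  | [] => []
  | '\\' :: rest =>
      match rest with
      | [] => [['\\']]                                   -- trailing backslash, keep it
      | c :: r =>
          if c = '\\' then ['\\', '\\'] :: fixA_go r     -- already escaped, keep both
          else if pvEscChars.contains c then
            ['\\'] :: [c] :: fixA_go r                   -- valid JSON escape, keep as is
          else
            ['\\', '\\'] :: [c] :: fixA_go r             -- invalid escape, add extra backslash
  | c :: rest => [c] :: fixA_go rest

def fix_latex_escaping (text : String) : String :=
  String.ofList (PySem.Chars.join [] (fixA_go text.toList))

-- ===== PORT B =====
-- B's while loop over parts[1:]: each segment is preceded by one backslash of the original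
def fixB_go : List (List Char) → List (List Char)
  | [] => []
  | (c :: p) :: rest =>      -- nonempty segment: its first char c followed the backslash
      ((if pvEscChars.contains c then ['\\'] else ['\\', '\\']) ++ (c :: p)) :: fixB_go rest
  | [] :: q :: rest' =>      -- empty segment between two backslashes: escaped pair
      (['\\', '\\'] ++ q) :: fixB_go rest'
  | [[]] => [['\\']]       -- trailing lone backslash

def fix_latex_escaping_alt (text : String) : String :=
  -- parts = text.split('\\'); res = [parts[0]] ++ loop over the rest; ''.join(res)
  match PySem.Chars.splitOn text.toList ['\\'] with
  | [] => ""   -- unreachable: str.split never returns an empty list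
  | p :: ps => String.ofList (PySem.Chars.join [] (p :: fixB_go ps))

-- ===== PRECONDITION & SPEC =====
def Spec_fix_latex_escaping (text : String) (out : String) : Prop := out = fix_latex_escaping_alt text
instance (text : String) (out : String) : Decidable (Spec_fix_latex_escaping text out) := by unfold Spec_fix_latex_escaping; infer_instance

-- ===== CLAIM (what is proved, stated in full; the proofs are below) =====
def Claim_equal_fix_latex_escaping : Prop := ∀ (text : String), Dom_fix_latex_escaping text → Spec_fix_latex_escaping text (fix_latex_escaping text)

-- ===== LEMMAS AND PROOFS =====

-- reference split: text.split('\\') as plain structural recursion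
def pvConsHead (x : List Char) : List (List Char) → List (List Char)
  | [] => [x]
  | h :: t => (x ++ h) :: t

def pvSplit1 : List Char → List (List Char)
  | [] => [[]]
  | c :: t => if c = '\\' then [] :: pvSplit1 t else pvConsHead [c] (pvSplit1 t)

theorem pvSplit1_ne_nil (cs : List Char) : pvSplit1 cs ≠ [] := by
  induction cs with
  | nil => simp [pvSplit1]
  | cons c t ih =>
    simp only [pvSplit1]
    split
    · simp
    · cases h : pvSplit1 t with
      | nil => exact absurd h ih
      | cons a b => simp [pvConsHead]

theorem pvConsHead_consHead (x y : List Char) (ls : List (List Char)) :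
    pvConsHead x (pvConsHead y ls) = pvConsHead (x ++ y) ls := by
  cases ls <;> simp [pvConsHead]

theorem splitOn_go_eq (fuel : Nat) (l cur : List Char) (acc : List (List Char))
    (h : l.length ≤ fuel) :
    PySem.Chars.splitOn.go ['\\'] fuel l cur acc
      = acc.reverse ++ pvConsHead cur.reverse (pvSplit1 l) := by
  induction fuel generalizing l cur acc with
  | zero =>
    have : l = [] := List.length_eq_zero_iff.mp (Nat.le_zero.mp h)
    subst this
    simp [PySem.Chars.splitOn.go, pvSplit1, pvConsHead]
  | succ n ih =>
    cases l with
    | nil => simp [PySem.Chars.splitOn.go, pvSplit1, pvConsHead]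
    | cons c rest =>
      simp only [PySem.Chars.splitOn.go]
      by_cases hc : c = '\\'
      · subst hc
        have hpre : (['\\'] : List Char).isPrefixOf ('\\' :: rest) = true := by
          simp [List.isPrefixOf]
        rw [if_pos hpre]
        simp only [List.length_cons] at h
        simp only [List.length, List.drop]
        rw [ih rest [] (cur.reverse :: acc) (by omega)]
        have hne := pvSplit1_ne_nil rest
        cases hs : pvSplit1 rest with
        | nil => exact absurd hs hne
        | cons a b =>
          simp [pvSplit1, pvConsHead, hs]
      · have hpre : (['\\'] : List Char).isPrefixOf (c :: rest) = false := by
          simp [List.isPrefixOf]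
          intro hh; exact absurd hh.symm hc
        rw [if_neg (by simp [hpre])]
        simp only [List.length_cons] at h
        rw [ih rest (c :: cur) acc (by omega)]
        simp [pvSplit1, hc, pvConsHead_consHead]

theorem splitOn_eq_split1 (cs : List Char) :
    PySem.Chars.splitOn cs ['\\'] = pvSplit1 cs := by
  unfold PySem.Chars.splitOn
  rw [splitOn_go_eq (cs.length + 1) cs [] [] (by omega)]
  cases h : pvSplit1 cs with
  | nil => exact absurd h (pvSplit1_ne_nil cs)
  | cons a b => simp [pvConsHead]

-- equation lemmas for the two recursions
theorem fixA_go_cons_ne {c : Char} (hc : c ≠ '\\') (t : List Char) :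
    fixA_go (c :: t) = [c] :: fixA_go t := by
  simp [fixA_go]

-- main invariant: A's joined output equals head-segment ++ B's processing of the rest
theorem main_lemma_bounded (n : Nat) : ∀ (cs : List Char), cs.length ≤ n →
    ∀ (p : List Char) (ps : List (List Char)),
      pvSplit1 cs = p :: ps → (fixA_go cs).flatten = p ++ (fixB_go ps).flatten := by
  induction n with
  | zero =>
    intro cs hlen p ps hs
    have : cs = [] := List.length_eq_zero_iff.mp (Nat.le_zero.mp hlen)
    subst this
    simp [pvSplit1] at hs
    obtain ⟨h1, h2⟩ := hs
    subst h1; subst h2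
    simp [fixA_go, fixB_go]
  | succ n ih =>
    intro cs hlen p ps hs
    cases cs with
    | nil =>
      simp [pvSplit1] at hs
      obtain ⟨h1, h2⟩ := hs
      subst h1; subst h2
      simp [fixA_go, fixB_go]
    | cons c t =>
      simp only [List.length_cons] at hlen
      by_cases hc : c = '\\'
      · subst hc
        -- a backslash starts the string: look at what follows
        simp only [pvSplit1] at hs
        obtain ⟨hp, hps⟩ : p = [] ∧ ps = pvSplit1 t := by
          cases hs; exact ⟨rfl, rfl⟩
        subst hp; subst hps
        cases t with
        | nil =>
          simp [fixA_go, pvSplit1, fixB_go]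
        | cons d u =>
          by_cases hd : d = '\\'
          · subst hd
            -- double backslash
            obtain ⟨q, qs, hq⟩ : ∃ q qs, pvSplit1 u = q :: qs := by
              cases h : pvSplit1 u with
              | nil => exact absurd h (pvSplit1_ne_nil u)
              | cons a b => exact ⟨a, b, rfl⟩
            have := ih u (by simp only [List.length_cons] at hlen; omega) q qs hq
            simp only [fixA_go]
            simp [pvSplit1, fixB_go, hq, this]
          · -- backslash followed by non-backslash d
            obtain ⟨q, qs, hq⟩ : ∃ q qs, pvSplit1 u = q :: qs := by
              cases h : pvSplit1 u with
              | nil => exact absurd h (pvSplit1_ne_nil u)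
              | cons a b => exact ⟨a, b, rfl⟩
            have := ih u (by simp only [List.length_cons] at hlen; omega) q qs hq
            simp only [fixA_go]
            rw [if_neg hd]
            by_cases hin : pvEscChars.contains d
            · rw [if_pos hin]
              rw [show pvSplit1 (d :: u) = (d :: q) :: qs by simp [pvSplit1, hd, hq, pvConsHead]]
              have hin' : d ∈ pvEscChars := by simpa using hin
              simp [fixB_go, hin', this]
            · rw [if_neg hin]
              rw [show pvSplit1 (d :: u) = (d :: q) :: qs by simp [pvSplit1, hd, hq, pvConsHead]]
              have hin' : d ∉ pvEscChars := by simpa using hin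
              simp [fixB_go, hin', this]
      · -- ordinary character c
        obtain ⟨q, qs, hq⟩ : ∃ q qs, pvSplit1 t = q :: qs := by
          cases h : pvSplit1 t with
          | nil => exact absurd h (pvSplit1_ne_nil t)
          | cons a b => exact ⟨a, b, rfl⟩
        simp only [pvSplit1, if_neg hc, hq, pvConsHead] at hs
        obtain ⟨hp, hps⟩ : p = c :: q ∧ ps = qs := by cases hs; exact ⟨rfl, rfl⟩
        subst hp; subst hps
        rw [fixA_go_cons_ne hc]
        simp [ih t (by omega) q _ hq]

theorem main_lemma (cs p : List Char) (ps : List (List Char))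
    (h : pvSplit1 cs = p :: ps) : (fixA_go cs).flatten = p ++ (fixB_go ps).flatten :=
  main_lemma_bounded cs.length cs le_rfl p ps h

theorem join_nil_flatten (parts : List (List Char)) :
    PySem.Chars.join [] parts = parts.flatten := by
  unfold PySem.Chars.join
  induction parts with
  | nil => simp [List.intercalate]
  | cons h t ih =>
    cases t with
    | nil => simp [List.intercalate]
    | cons a b =>
      simp only [List.intercalate, List.intersperse] at ih ⊢
      simp_all

-- ===== VERDICT (by name: the statement is the Claim_ definition above) =====
theorem fix_latex_escaping_spec : Claim_equal_fix_latex_escaping := by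
  intro text _
  unfold Spec_fix_latex_escaping fix_latex_escaping fix_latex_escaping_alt
  rw [splitOn_eq_split1]
  cases h : pvSplit1 text.toList with
  | nil => exact absurd h (pvSplit1_ne_nil _)
  | cons p ps =>
    simp only [join_nil_flatten, List.flatten_cons, main_lemma text.toList p ps h]
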